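-- pv_equiv track=rewrite | github.com/danielfess/Integer-Solutions-via-Invariant-Theory---Python | indices.py | valid_entries
-- ===== SOURCE A (Python) =====
-- valid_dict = {}
--
-- def valid_entries(d):
--     """Given a tuple d of tuples, tests if d contains duplicates or
--     reverse duplicates, if it contains any tuples of the form (k,k), if
--     it contains (1,5) or (5,1), or if it contains either [(1,4),(3,5)] or
--     [(1,3),(2,5)] - or the reverses of these.  In any of these cases,
--     returns False. Otherwise, returns True.
--
--     d: sequence of tuples
--
--     output: bool
--     """
--
--     if d in valid_dict:
--         return valid_dict[d]
--
--     forbidden1 = {(1,4),(4,1),(3,5),(5,3)}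
--     forbidden2 = {(2,5),(5,2),(3,1),(1,3)}
--     reverse = []
--     newtuple = d
--     newtuple += (1,5),
--     for item in newtuple:
--         newitem = item[::-1]
--         reverse.append(newitem)
--     set1 = set(newtuple)
--     set2 = set(reverse)
--     set3 = set1.union(set2)
--     if len(set3) < 2*len(newtuple):
--         valid_dict[d] = False
--         return False
--     elif len(set3.union(forbidden1)) == len(set3) or len(set3.union(forbidden2)) == len(set3):
--         valid_dict[d] = False
--         return False
--     else:
--         valid_dict[d] = True
--         return True
-- ===== SOURCE B (Python) =====
-- valid_dict = {}
--
-- def valid_entries(d):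
--     """Single-pass re-implementation: walk d once keeping a symmetric 'seen'
--     set (seeded with the (1,5)/(5,1) sentinel), instead of building the
--     full reverse list and comparing set cardinalities."""
--     if d in valid_dict:
--         return valid_dict[d]
--     seen = {(1, 5), (5, 1)}
--     result = True
--     for a, b in d:
--         if a == b or (a, b) in seen:
--             result = False
--             break
--         seen.add((a, b))
--         seen.add((b, a))
--     else:
--         if ((1, 4) in seen and (3, 5) in seen) or ((2, 5) in seen and (1, 3) in seen):
--             result = False
--     valid_dict[d] = result
--     return result
-- ===== Notes on version B (the rewrite author's own statement) =====
-- stated objective: simpler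
-- what changed: Replaces A's construction of a reversed copy, two sets and cardinality comparisons by a single pass over d that maintains one symmetric 'seen' set (seeded with the (1,5)/(5,1) sentinel) with early exit, then two membership tests for the forbidden patterns; the valid_dict cache is kept.
import Mathlib
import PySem

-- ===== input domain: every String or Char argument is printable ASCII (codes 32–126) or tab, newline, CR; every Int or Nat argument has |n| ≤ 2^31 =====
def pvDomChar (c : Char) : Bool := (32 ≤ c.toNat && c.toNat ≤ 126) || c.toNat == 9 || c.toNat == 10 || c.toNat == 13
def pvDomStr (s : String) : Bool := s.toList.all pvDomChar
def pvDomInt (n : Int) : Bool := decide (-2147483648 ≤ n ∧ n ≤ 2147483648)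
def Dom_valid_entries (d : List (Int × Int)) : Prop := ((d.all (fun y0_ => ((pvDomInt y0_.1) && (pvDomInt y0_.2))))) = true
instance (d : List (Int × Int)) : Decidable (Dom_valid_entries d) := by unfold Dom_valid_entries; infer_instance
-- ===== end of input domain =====

-- B replaces A's "build reverse list, compare set cardinalities" test by a single pass over d
-- with a symmetric 'seen' set (objective: simpler); the valid_dict cache side effect is kept in Source B.


-- ===== PORT A =====
-- The valid_dict cache only memoises the pure result; the port computes it directly.
def valid_entries (d : List (Int × Int)) : Bool :=
  let forbidden1 : List (Int × Int) := [(1,4),(4,1),(3,5),(5,3)]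
  let forbidden2 : List (Int × Int) := [(2,5),(5,2),(3,1),(1,3)]
  let newtuple : List (Int × Int) := d ++ [(1,5)]
  -- for item in newtuple: reverse.append(item[::-1])
  let reverse : List (Int × Int) := newtuple.foldl (fun acc item => acc ++ [(item.2, item.1)]) []
  let set1 := PySem.Set.ofList newtuple
  let set2 := PySem.Set.ofList reverse
  let set3 := PySem.Set.union set1 set2
  if set3.length < 2 * newtuple.length then false
  else if (PySem.Set.union set3 forbidden1).length = set3.length
       ∨ (PySem.Set.union set3 forbidden2).length = set3.length then false
  else true

-- ===== PORT B =====
-- the for-loop of Source B (break ↦ none)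
def pvSeenLoop (l : List (Int × Int)) (seen : PySem.Set (Int × Int)) :
    Option (PySem.Set (Int × Int)) :=
  match l with
  | [] => some seen
  | (a, b) :: rest =>
      if a == b || PySem.Set.contains seen (a, b) then none
      else pvSeenLoop rest (PySem.Set.add (PySem.Set.add seen (a, b)) (b, a))

def valid_entries_alt (d : List (Int × Int)) : Bool :=
  match pvSeenLoop d (PySem.Set.ofList [(1,5),(5,1)]) with
  | none => false
  | some seen =>
      if (PySem.Set.contains seen (1,4) && PySem.Set.contains seen (3,5))
        || (PySem.Set.contains seen (2,5) && PySem.Set.contains seen (1,3)) then false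
      else true

-- ===== PRECONDITION & SPEC =====
def Spec_valid_entries (d : List (Int × Int)) (out : Bool) : Prop := out = valid_entries_alt d
instance (d : List (Int × Int)) (out : Bool) : Decidable (Spec_valid_entries d out) := by unfold Spec_valid_entries; infer_instance

-- ===== CLAIM (what is proved, stated in full; the proofs are below) =====
def Claim_equal_valid_entries : Prop := ∀ (d : List (Int × Int)), Dom_valid_entries d → Spec_valid_entries d (valid_entries d)

-- ===== LEMMAS AND PROOFS =====

-- the interleaved item/reverse-item list that B's loop inserts
def pvSymFlat (l : List (Int × Int)) : List (Int × Int) :=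
  l.flatMap (fun p => [p, (p.2, p.1)])

theorem pvFoldlApp (l : List (Int × Int)) (acc : List (Int × Int)) :
    l.foldl (fun a item => a ++ [(item.2, item.1)]) acc
      = acc ++ l.map (fun p => (p.2, p.1)) := by
  induction l generalizing acc with
  | nil => simp
  | cons x xs ih => simp [ih]

theorem pvOfListLenLt (M : List (Int × Int)) :
    (PySem.Set.ofList M).length < M.length ↔ ¬ M.Nodup := by
  constructor
  · intro h hnd
    rw [PySem.Set.ofList_eq_self_of_nodup M hnd] at h
    omega
  · intro hnd
    induction M with
    | nil => simp at hnd
    | cons x xs ih =>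
      rw [PySem.Set.ofList_cons]
      simp only [List.length_cons]
      by_cases hx : x ∈ xs
      · have h1 : (PySem.Set.ofList xs).discard x ≠ PySem.Set.ofList xs := by
          intro he
          have : x ∈ (PySem.Set.ofList xs).discard x := by
            rw [he, PySem.Set.mem_ofList]; exact hx
          rw [PySem.Set.mem_discard] at this
          exact this.2 rfl
        have h2 : ((PySem.Set.ofList xs).discard x).length < (PySem.Set.ofList xs).length := by
          have hs : ((PySem.Set.ofList xs).discard x).Sublist (PySem.Set.ofList xs) :=
            List.filter_sublist
          rcases Nat.lt_or_ge ((PySem.Set.ofList xs).discard x).length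
              (PySem.Set.ofList xs).length with h | h
          · exact h
          · exact absurd (hs.eq_of_length_le h) h1
        have := PySem.Set.length_ofList_le xs
        omega
      · have hxs : ¬ xs.Nodup := by
          intro hn; exact hnd (List.nodup_cons.mpr ⟨hx, hn⟩)
        have h2 : ((PySem.Set.ofList xs).discard x).length ≤ (PySem.Set.ofList xs).length :=
          List.length_filter_le _ _
        have := ih hxs
        omega

theorem pvUnionOfList (xs ys : List (Int × Int)) :
    PySem.Set.union (PySem.Set.ofList xs) (PySem.Set.ofList ys)
      = PySem.Set.ofList (xs ++ ys) := by
  show PySem.Set.update _ _ = _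
  rw [PySem.Set.update_eq_append_filter, PySem.Set.ofList_ofList,
    PySem.Set.ofList_append, PySem.Set.update_eq_append_filter]

theorem pvUnionLenEq (s : PySem.Set (Int × Int)) (f : List (Int × Int)) :
    ((PySem.Set.union s f).length = s.length ↔ ∀ x ∈ f, x ∈ s) := by
  show (PySem.Set.update s f).length = _ ↔ _
  rw [PySem.Set.update_eq_append_filter]
  simp only [List.length_append]
  constructor
  · intro h x hx
    have hf : (List.filter (fun y => !s.contains y) (PySem.Set.ofList f)) = [] := by
      have : (List.filter (fun y => !s.contains y) (PySem.Set.ofList f)).length = 0 := by omega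
      exact List.eq_nil_of_length_eq_zero this
    by_contra hns
    have hmem : x ∈ List.filter (fun y => !s.contains y) (PySem.Set.ofList f) := by
      rw [List.mem_filter]
      refine ⟨(PySem.Set.mem_ofList f x).mpr hx, ?_⟩
      simpa using hns
    rw [hf] at hmem; simp at hmem
  · intro h
    have : (List.filter (fun y => !s.contains y) (PySem.Set.ofList f)) = [] := by
      rw [List.filter_eq_nil_iff]
      intro x hx
      have := h x ((PySem.Set.mem_ofList f x).mp hx)
      simp [this]
    rw [this]; simp

theorem pvCountSymFlat (l : List (Int × Int)) (x : Int × Int) :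
    (pvSymFlat l).count x = l.count x + (l.map (fun p => (p.2, p.1))).count x := by
  induction l with
  | nil => simp [pvSymFlat]
  | cons p ps ih =>
    simp only [pvSymFlat, List.flatMap_cons, List.map_cons] at *
    simp [List.count_cons, ih]
    by_cases h1 : p = x <;> by_cases h2 : (p.2, p.1) = x <;> simp [h1, h2] <;> omega

theorem pvPermKey (d : List (Int × Int)) :
    ((d ++ [((1:Int),(5:Int))]) ++ (d ++ [((1:Int),(5:Int))]).map (fun p => (p.2, p.1))).Perm
      ([((1:Int),(5:Int)), ((5:Int),(1:Int))] ++ pvSymFlat d) := by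
  rw [List.perm_iff_count]
  intro x
  simp [List.count_append, pvCountSymFlat, List.count_cons]
  by_cases h1 : ((1:Int),(5:Int)) = x <;> by_cases h2 : ((5:Int),(1:Int)) = x <;>
    simp [h1, h2] <;> omega

-- characterisation of B's loop
theorem pvSeenLoopChar (l : List (Int × Int)) (seen : PySem.Set (Int × Int))
    (hnd : seen.Nodup) (hsym : ∀ x ∈ seen, ((x.2 : Int), (x.1 : Int)) ∈ seen) :
    match pvSeenLoop l seen with
    | none => ¬ (seen ++ pvSymFlat l).Nodup
    | some t => (seen ++ pvSymFlat l).Nodup ∧ ∀ x, x ∈ t ↔ x ∈ seen ++ pvSymFlat l := by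
  induction l generalizing seen with
  | nil => simp [pvSeenLoop, pvSymFlat, hnd]
  | cons p rest ih =>
    obtain ⟨a, b⟩ := p
    have hflat : pvSymFlat ((a,b) :: rest) = (a,b) :: (b,a) :: pvSymFlat rest := by
      simp [pvSymFlat]
    by_cases hfail : (a == b || PySem.Set.contains seen (a, b)) = true
    · rw [pvSeenLoop, if_pos hfail]
      rw [hflat]
      intro hcon
      rcases Bool.or_eq_true_iff.mp hfail with h | h
      · have hab : a = b := by simpa using h
        subst hab
        have := hcon.of_append_right
        simp at this
      · have : (a,b) ∈ seen := (PySem.Set.contains_iff seen (a,b)).mp h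
        have hdisj := List.disjoint_of_nodup_append hcon
        exact hdisj this (by simp)
    · rw [pvSeenLoop, if_neg hfail]
      have hab : a ≠ b := by intro h; exact hfail (by simp [h])
      have hmem : (a,b) ∉ seen := by
        intro h; exact hfail (by simp; exact Or.inr h)
      have hmem' : (b,a) ∉ seen := fun h => hmem (hsym (b,a) h)
      have hne : ((b,a) : Int × Int) ≠ (a,b) := by
        simp only [ne_eq, Prod.mk.injEq, not_and]
        intro h1 h2; exact hab h2
      have hadd : PySem.Set.add (PySem.Set.add seen (a,b)) (b,a) = seen ++ [(a,b),(b,a)] := by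
        rw [PySem.Set.add_of_not_mem hmem, PySem.Set.add_of_not_mem (by
          intro h
          rcases List.mem_append.mp h with h | h
          · exact hmem' h
          · exact hne (by simpa using h))]
        simp
      have hne' : ((a,b) : Int × Int) ≠ (b,a) := fun h => hne h.symm
      have hnd' : (seen ++ [(a,b),(b,a)]).Nodup := by
        rw [List.nodup_append]
        refine ⟨hnd, by simp [hne'], ?_⟩
        intro y hy z hz
        simp only [List.mem_cons, List.not_mem_nil, or_false] at hz
        rcases hz with rfl | rfl
        · exact fun h => hmem (h ▸ hy)
        · exact fun h => hmem' (h ▸ hy)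
      have hsym' : ∀ x ∈ seen ++ [(a,b),(b,a)], ((x.2 : Int), (x.1 : Int)) ∈ seen ++ [(a,b),(b,a)] := by
        intro x hx
        rcases List.mem_append.mp hx with h | h
        · exact List.mem_append.mpr (Or.inl (hsym x h))
        · simp at h
          rcases h with rfl | rfl <;> simp
      have := ih (seen ++ [(a,b),(b,a)]) hnd' hsym'
      rw [hadd, hflat]
      have happ : seen ++ (a,b) :: (b,a) :: pvSymFlat rest
          = (seen ++ [(a,b),(b,a)]) ++ pvSymFlat rest := by simp
      rw [happ]
      exact this

theorem pvSymFlatSwapMem (l : List (Int × Int)) (x : Int × Int) (h : x ∈ pvSymFlat l) :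
    ((x.2 : Int), (x.1 : Int)) ∈ pvSymFlat l := by
  simp only [pvSymFlat, List.mem_flatMap, List.mem_cons, List.not_mem_nil, or_false] at h ⊢
  obtain ⟨p, hp, hcase⟩ := h
  rcases hcase with h | h
  · exact ⟨p, hp, Or.inr (by rw [h])⟩
  · exact ⟨p, hp, Or.inl (by rw [h])⟩

theorem valid_entries_spec : Claim_equal_valid_entries := by
  intro d _
  unfold Spec_valid_entries valid_entries valid_entries_alt
  simp only [pvFoldlApp, List.nil_append, pvUnionOfList]
  have hseen0 : PySem.Set.ofList [((1:Int),(5:Int)), ((5:Int),(1:Int))]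
      = [((1:Int),(5:Int)), ((5:Int),(1:Int))] := by decide
  rw [hseen0]
  have hchar := pvSeenLoopChar d [((1:Int),(5:Int)), ((5:Int),(1:Int))] (by decide) (by decide)
  have hperm := pvPermKey d
  have hlen : ((d ++ [((1:Int),(5:Int))]) ++ (d ++ [((1:Int),(5:Int))]).map (fun p => (p.2, p.1))).length
      = 2 * (d ++ [((1:Int),(5:Int))]).length := by simp; omega
  have hlt : ((PySem.Set.ofList ((d ++ [((1:Int),(5:Int))]) ++ (d ++ [((1:Int),(5:Int))]).map (fun p => (p.2, p.1)))).length
        < 2 * (d ++ [((1:Int),(5:Int))]).length)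
      ↔ ¬ ([((1:Int),(5:Int)), ((5:Int),(1:Int))] ++ pvSymFlat d).Nodup := by
    rw [← hlen, pvOfListLenLt, hperm.nodup_iff]
  rcases hre : pvSeenLoop d [((1:Int),(5:Int)), ((5:Int),(1:Int))] with _ | t
  · rw [hre] at hchar
    rw [if_pos (hlt.mpr hchar)]
  · rw [hre] at hchar
    rw [if_neg (by rw [hlt]; exact fun h => h hchar.1)]
    have hmem3 : ∀ x : Int × Int,
        x ∈ PySem.Set.ofList ((d ++ [((1:Int),(5:Int))]) ++ (d ++ [((1:Int),(5:Int))]).map (fun p => (p.2, p.1)))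
          ↔ x ∈ t := by
      intro x
      rw [PySem.Set.mem_ofList, hperm.mem_iff, ← hchar.2 x]
    have htsym : ∀ x : Int × Int, x ∈ t → ((x.2 : Int), (x.1 : Int)) ∈ t := by
      intro x hx
      rw [hchar.2] at hx ⊢
      rcases List.mem_append.mp hx with h | h
      · refine List.mem_append.mpr (Or.inl ?_)
        simp only [List.mem_cons, List.not_mem_nil, or_false] at h ⊢
        rcases h with rfl | rfl
        · exact Or.inr rfl
        · exact Or.inl rfl
      · exact List.mem_append.mpr (Or.inr (pvSymFlatSwapMem d x h))
    have hswap : ∀ u v : Int, ((u, v) : Int × Int) ∈ t ↔ ((v, u) : Int × Int) ∈ t :=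
      fun u v => ⟨fun h => htsym (u,v) h, fun h => htsym (v,u) h⟩
    have hcond : ((PySem.Set.union
          (PySem.Set.ofList ((d ++ [((1:Int),(5:Int))]) ++ (d ++ [((1:Int),(5:Int))]).map (fun p => (p.2, p.1))))
          [((1:Int),(4:Int)),(4,1),(3,5),(5,3)]).length
          = (PySem.Set.ofList ((d ++ [((1:Int),(5:Int))]) ++ (d ++ [((1:Int),(5:Int))]).map (fun p => (p.2, p.1)))).length
        ∨ (PySem.Set.union
          (PySem.Set.ofList ((d ++ [((1:Int),(5:Int))]) ++ (d ++ [((1:Int),(5:Int))]).map (fun p => (p.2, p.1))))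
          [((2:Int),(5:Int)),(5,2),(3,1),(1,3)]).length
          = (PySem.Set.ofList ((d ++ [((1:Int),(5:Int))]) ++ (d ++ [((1:Int),(5:Int))]).map (fun p => (p.2, p.1)))).length)
        ↔ ((PySem.Set.contains t (1,4) && PySem.Set.contains t (3,5))
          || (PySem.Set.contains t (2,5) && PySem.Set.contains t (1,3))) = true := by
      rw [pvUnionLenEq, pvUnionLenEq]
      simp only [List.forall_mem_cons, hmem3,
        Bool.or_eq_true, Bool.and_eq_true, PySem.Set.contains_iff]
      have htriv : ∀ x ∈ ([] : List (Int × Int)), x ∈ t := by simp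
      constructor
      · rintro (⟨h1, _, h3, _⟩ | ⟨h1, _, _, h4, _⟩)
        · exact Or.inl ⟨h1, h3⟩
        · exact Or.inr ⟨h1, h4⟩
      · rintro (⟨h1, h3⟩ | ⟨h1, h3⟩)
        · exact Or.inl ⟨h1, (hswap 1 4).mp h1, h3, (hswap 3 5).mp h3, htriv⟩
        · exact Or.inr ⟨h1, (hswap 2 5).mp h1, (hswap 3 1).mpr h3, h3, htriv⟩
    rw [if_congr hcond rfl rfl]
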